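-- pv_equiv track=rewrite | github.com/junes7/python_algorithm | 프로그래머스/0/120886. A로 B 만들기/A로 B 만들기.py | solution
-- ===== SOURCE A (Python) =====
-- def solution(before, after):
--     # method1 sorted 정렬 함수
--     # r=1 if sorted(before)==sorted(after) else 0
--     # method2
--     b=list(before)
--     r=0
--     for i in after:
--         try:
--             del b[b.index(i)]
--         except:
--             r=0
--     if len(b)==0:
--         r=1
--     return r
-- ===== SOURCE B (Python) =====
-- def solution(before, after):
--     b = list(before)
--     a = list(after)
--     return 1 if all(b.count(c) <= a.count(c) for c in set(b)) else 0
-- ===== Notes on version B (the rewrite author's own statement) =====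
-- stated objective: faster
-- what changed: Replaces A's destructive loop (for each char of after, an O(n) b.index scan plus del on the shrinking list) with a per-distinct-character count comparison: 1 iff every char of before occurs at least as often in after.
import Mathlib
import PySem

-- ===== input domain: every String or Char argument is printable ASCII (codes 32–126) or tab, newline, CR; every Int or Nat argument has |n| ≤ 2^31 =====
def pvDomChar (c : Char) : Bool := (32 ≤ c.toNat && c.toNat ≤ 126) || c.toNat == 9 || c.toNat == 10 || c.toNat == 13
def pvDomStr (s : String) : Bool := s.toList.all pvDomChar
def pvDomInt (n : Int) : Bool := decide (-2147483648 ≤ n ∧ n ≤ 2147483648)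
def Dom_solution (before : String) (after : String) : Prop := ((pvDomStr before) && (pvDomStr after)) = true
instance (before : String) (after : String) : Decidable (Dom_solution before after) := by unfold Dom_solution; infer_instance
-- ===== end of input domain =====

-- B replaces A's destructive index-and-delete loop by a per-distinct-character count comparison (simpler, no mutation).

-- ===== PORT A =====
-- for i in after: try: del b[b.index(i)] except: r = 0   (r stays 0 either way)
def solution (before : String) (after : String) : Int :=
  let b0 := before.toList
  let r : Int := 0
  let b := after.toList.foldl (fun b i =>
    match PySem.List.index? b i with
    | some j =>
      match PySem.List.pop? b (j : Int) with
      | some (_, rest) => rest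
      | none => b            -- unreachable: j is a valid index
    | none => b) b0          -- ValueError caught: r = 0 (unchanged)
  if b.length = 0 then 1 else r

-- ===== PORT B =====
def solution_alt (before : String) (after : String) : Int :=
  let b := before.toList
  let a := after.toList
  if (PySem.Set.ofList b).all (fun c => PySem.List.count b c ≤ PySem.List.count a c) then 1 else 0

-- ===== PRECONDITION & SPEC =====
def Spec_solution (before : String) (after : String) (out : Int) : Prop := out = solution_alt before after
instance (before : String) (after : String) (out : Int) : Decidable (Spec_solution before after out) := by unfold Spec_solution; infer_instance

-- ===== CLAIM (what is proved, stated in full; the proofs are below) =====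
def Claim_equal_solution : Prop := ∀ (before : String) (after : String), Dom_solution before after → Spec_solution before after (solution before after)

-- ===== LEMMAS AND PROOFS =====

-- A's loop body is exactly `List.erase`
theorem pv_eraseIdx_len (pre suf : List Char) (v : Char) :
    (pre ++ v :: suf).eraseIdx pre.length = pre ++ suf := by
  induction pre with
  | nil => simp
  | cons x rest ih => simpa using ih

theorem pv_erase_append (pre suf : List Char) (v : Char) (h : v ∉ pre) :
    (pre ++ v :: suf).erase v = pre ++ suf := by
  induction pre with
  | nil => simp
  | cons x rest ih =>
    have hx : x ≠ v := fun he => h (by simp [he])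
    simp only [List.cons_append, List.erase_cons]
    rw [if_neg (by simp [hx])]
    rw [ih (fun hm => h (by simp [hm]))]

theorem pv_step_eq_erase (b : List Char) (i : Char) :
    (match PySem.List.index? b i with
     | some j =>
       match PySem.List.pop? b (j : Int) with
       | some (_, rest) => rest
       | none => b
     | none => b) = b.erase i := by
  rcases h : PySem.List.index? b i with _ | j
  · simp only
    rw [List.erase_of_not_mem ((PySem.List.index?_eq_none_iff b i).mp h)]
  · obtain ⟨hk, _, _⟩ := PySem.List.getElem_of_index?_eq_some h
    simp only [PySem.List.pop?_natCast b j hk]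
    obtain ⟨pre, suf, hb, hlen, hnm⟩ := (PySem.List.index?_eq_some_iff b i j).mp h
    subst hb; subst hlen
    rw [pv_eraseIdx_len, pv_erase_append _ _ _ hnm]

theorem pv_count_foldl_erase (ys : List Char) (l : List Char) (c : Char) :
    (ys.foldl List.erase l).count c = l.count c - ys.count c := by
  induction ys generalizing l with
  | nil => simp
  | cons i ys ih =>
    simp only [List.foldl_cons, ih, List.count_erase, List.count_cons]
    omega

theorem pv_final_nil_iff (ys l : List Char) :
    ys.foldl List.erase l = [] ↔ ∀ c ∈ l, l.count c ≤ ys.count c := by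
  constructor
  · intro h c hc
    have := pv_count_foldl_erase ys l c
    rw [h] at this
    simp at this
    omega
  · intro h
    rw [List.eq_nil_iff_forall_not_mem]
    intro c hc
    have hc' : 0 < (ys.foldl List.erase l).count c := List.count_pos_iff.mpr hc
    rw [pv_count_foldl_erase] at hc'
    have hmem : c ∈ l := by
      by_contra hn
      have : l.count c = 0 := List.count_eq_zero.mpr hn
      omega
    have := h c hmem
    omega

-- ===== VERDICT (by name: the statement is the Claim_ definition above) =====
theorem solution_spec : Claim_equal_solution := by
  intro before after _
  unfold Spec_solution solution solution_alt
  simp only [funext fun b => funext fun i => pv_step_eq_erase b i]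
  have hiff : after.toList.foldl List.erase before.toList = [] ↔
      ((PySem.Set.ofList before.toList).all
        (fun c => PySem.List.count before.toList c ≤ PySem.List.count after.toList c)) = true := by
    rw [pv_final_nil_iff]
    simp [List.all_eq_true, PySem.List.count_eq, PySem.Set.mem_ofList]
  rcases h : after.toList.foldl List.erase before.toList with _ | ⟨x, xs⟩
  · rw [if_pos (by simp), if_pos (hiff.mp h)]
  · rw [if_neg (by simp), if_neg]
    intro hall
    have hnil := hiff.mpr hall
    rw [h] at hnil
    exact List.cons_ne_nil _ _ hnil
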